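-- pv_equiv track=rewrite | github.com/yeonjae0/git-training-1 | 파이썬 파이/1학기 문제들/2.17/고대유적ex.py | count
-- ===== SOURCE A (Python) =====
-- def count(arr):
--     mx = 2  # 구조물의 최소 크기
--     for lst in arr:
--         cnt = 0
--         for n in lst:
--             if n == 1:
--                 cnt += 1
--                 if mx < cnt:
--                     mx = cnt
--             else:
--                 cnt = 0
--     return mx
-- ===== SOURCE B (Python) =====
-- def count(arr):
--     best = 2
--     for row in arr:
--         i, n = 0, len(row)
--         while i < n:
--             if row[i] == 1:
--                 j = i + 1
--                 while j < n and row[j] == 1: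
--                     j += 1
--                 if j - i > best:
--                     best = j - i
--                 i = j
--             else:
--                 i += 1
--     return best
-- ===== Notes on version B (the rewrite author's own statement) =====
-- stated objective: alternative
-- what changed: B scans each row by spans (on hitting a 1 it jumps forward over the whole maximal run and compares its full length once) instead of A's per-element counter that is incremented, max-compared and reset element by element.
import Mathlib
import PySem

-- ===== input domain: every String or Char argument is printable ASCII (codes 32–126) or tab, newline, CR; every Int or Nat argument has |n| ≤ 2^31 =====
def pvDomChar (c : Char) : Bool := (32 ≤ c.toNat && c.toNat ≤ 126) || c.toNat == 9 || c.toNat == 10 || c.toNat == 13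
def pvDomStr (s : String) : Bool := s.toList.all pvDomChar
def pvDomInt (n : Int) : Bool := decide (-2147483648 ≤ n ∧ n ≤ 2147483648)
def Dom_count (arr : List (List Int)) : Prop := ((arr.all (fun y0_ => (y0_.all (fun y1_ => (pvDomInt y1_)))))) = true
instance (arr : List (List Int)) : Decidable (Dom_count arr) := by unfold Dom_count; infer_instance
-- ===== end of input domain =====

-- B scans each row by whole runs instead of A's per-element counter; same result, same cost (objective: alternative).

-- ===== PORT A =====
-- inner loop of A: state (cnt, mx)
def countStep (s : Int × Int) (n : Int) : Int × Int :=
  if n == 1 then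
    let cnt := s.1 + 1
    (cnt, if s.2 < cnt then cnt else s.2)
  else (0, s.2)

def count (arr : List (List Int)) : Int :=
  arr.foldl (fun mx lst => (lst.foldl countStep (0, mx)).2) 2

-- ===== PORT B =====
-- B's row scan: on a 1, take the whole maximal run (the inner `while j < n` scan = takeWhile),
-- compare its length with best once, and resume after the run (dropWhile).
def scanRow : List Int → Int → Int
  | [], best => best
  | n :: t, best =>
    if n == 1 then
      let run : Int := 1 + (t.takeWhile (fun m => m == 1)).length
      scanRow (t.dropWhile (fun m => m == 1)) (if run > best then run else best)
    else
      scanRow t best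
termination_by l => l.length
decreasing_by
  · exact Nat.lt_succ_of_le (List.length_dropWhile_le _ _)
  · exact Nat.lt_succ_self _

def count_alt (arr : List (List Int)) : Int :=
  arr.foldl (fun best row => scanRow row best) 2

-- ===== PRECONDITION & SPEC =====
def Spec_count (arr : List (List Int)) (out : Int) : Prop := out = count_alt arr
instance (arr : List (List Int)) (out : Int) : Decidable (Spec_count arr out) := by unfold Spec_count; infer_instance

-- ===== CLAIM (what is proved, stated in full; the proofs are below) =====
def Claim_equal_count : Prop := ∀ (arr : List (List Int)), Dom_count arr → Spec_count arr (count arr)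

-- ===== LEMMAS AND PROOFS =====

-- A's inner fold from a pending count cnt ≥ 0 with mx ≥ cnt absorbs the leading run of 1s in one go.
lemma foldl_run (t : List Int) : ∀ (cnt mx : Int), 0 ≤ cnt → cnt ≤ mx →
    (t.foldl countStep (cnt, mx)).2
      = ((t.dropWhile (fun m => m == 1)).foldl countStep
          (0, max mx (cnt + ((t.takeWhile (fun m => m == 1)).length : Int)))).2 := by
  induction t with
  | nil =>
    intro cnt mx h0 hle
    simp [List.foldl]
    omega
  | cons m t' ih =>
    intro cnt mx h0 hle
    by_cases hm : m = 1
    · subst hm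
      simp only [List.takeWhile, List.dropWhile, List.foldl, countStep]
      norm_num
      have h1 : (0 : Int) ≤ cnt + 1 := by omega
      have h2 : cnt + 1 ≤ (if mx ≤ cnt then cnt + 1 else mx) := by split_ifs <;> omega
      rw [ih (cnt + 1) _ h1 h2]
      have hM : max (if mx ≤ cnt then cnt + 1 else mx)
            (cnt + 1 + ((t'.takeWhile (fun m => m == 1)).length : Int))
          = max mx (cnt + (((t'.takeWhile (fun m => m == 1)).length : Int) + 1)) := by
        split_ifs <;> omega
      rw [hM]
    · have hb : (m == 1) = false := by simp [hm]
      simp only [List.takeWhile, List.dropWhile, hb, if_false, Bool.false_eq_true,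
        List.foldl, countStep, List.length_nil]
      norm_num [hm]
      have hmax : mx ⊔ cnt = mx := by omega
      rw [hmax]

lemma foldl_eq_scanRow (l : List Int) (mx : Int) :
    (l.foldl countStep (0, mx)).2 = scanRow l mx := by
  induction l, mx using scanRow.induct with
  | case1 mx => simp [List.foldl, scanRow]
  | case2 n t mx hn run ih =>
    have hn1 : n = 1 := by simpa using hn
    subst hn1
    rw [scanRow]
    simp only [beq_self_eq_true, if_true]
    have hstep : (List.foldl countStep (0, mx) (1 :: t)).2
        = (List.foldl countStep (1, if mx < 1 then 1 else mx) t).2 := by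
      simp [List.foldl, countStep]
    rw [hstep, foldl_run t 1 (if mx < 1 then 1 else mx) (by omega) (by split_ifs <;> omega)]
    have hm2 : (if mx < 1 then 1 else mx) ⊔ (1 + ((t.takeWhile (fun m => m == 1)).length : Int))
        = (if (1 + ((t.takeWhile (fun m => m == 1)).length : Int)) > mx
            then 1 + ((t.takeWhile (fun m => m == 1)).length : Int) else mx) := by
      split_ifs <;> omega
    rw [hm2]
    simp only [dite_eq_ite] at ih
    exact ih
  | case3 n t mx hn ih =>
    have hb : (n == 1) = false := by simpa using hn
    rw [scanRow]
    simp only [hb, List.foldl, countStep, if_false, Bool.false_eq_true]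
    exact ih

lemma count_eq_alt (arr : List (List Int)) : count arr = count_alt arr := by
  unfold count count_alt
  suffices h : ∀ init : Int,
      arr.foldl (fun mx lst => (lst.foldl countStep (0, mx)).2) init
        = arr.foldl (fun best row => scanRow row best) init from h 2
  induction arr with
  | nil => intro init; rfl
  | cons row rest ih =>
    intro init
    simp only [List.foldl]
    rw [foldl_eq_scanRow]
    exact ih _

-- ===== VERDICT (by name: the statement is the Claim_ definition above) =====
theorem count_spec : Claim_equal_count := by
  intro arr _
  unfold Spec_count
  exact count_eq_alt arr
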